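-- pv_equiv track=rewrite | github.com/masahiro-999/atcoder-workspace | abc117/C/main.py | solve
-- ===== SOURCE A (Python) =====
-- def solve(N: int, M: int, X: "List[int]"):
--     if N >= M:
--         return 0
--     else:
--         X.sort()
--         d = [(i,X[i+1] - X[i]) for i in range(M-1)]
--         d.sort(key=lambda x: x[1],reverse=True)
--         d2 = d[:N-1]
--         d2.sort(key=lambda x: x[0])
--
--         split_pos = [-1] + [i for i,_ in d2] + [M-1]
--
--         ans = 0
--         for i in range(len(split_pos)-1):
--             ans += X[split_pos[i+1]] - X[split_pos[i]+1]
--         return ans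
-- ===== SOURCE B (Python) =====
-- def solve(N: int, M: int, X: "List[int]"):
--     # Note: like A, sorts X in place (same observable mutation).
--     if N >= M:
--         return 0
--     X.sort()
--     gaps = [X[i + 1] - X[i] for i in range(M - 1)]
--     gaps.sort(reverse=True)
--     return X[M - 1] - X[0] - sum(gaps[:N - 1])
-- ===== Notes on version B (the rewrite author's own statement) =====
-- stated objective: simpler
-- what changed: B replaces A's gap-index bookkeeping (index/gap pairs, value-sort, slice, re-sort by index, rebuilding split positions and a per-segment summation loop) with the identity 'answer = total range minus the sum of the N-1 largest gap values': it sorts only the plain gap values (no key function, no pairs) and subtracts the top-(N-1) sum from X[M-1]-X[0].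
import Mathlib
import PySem

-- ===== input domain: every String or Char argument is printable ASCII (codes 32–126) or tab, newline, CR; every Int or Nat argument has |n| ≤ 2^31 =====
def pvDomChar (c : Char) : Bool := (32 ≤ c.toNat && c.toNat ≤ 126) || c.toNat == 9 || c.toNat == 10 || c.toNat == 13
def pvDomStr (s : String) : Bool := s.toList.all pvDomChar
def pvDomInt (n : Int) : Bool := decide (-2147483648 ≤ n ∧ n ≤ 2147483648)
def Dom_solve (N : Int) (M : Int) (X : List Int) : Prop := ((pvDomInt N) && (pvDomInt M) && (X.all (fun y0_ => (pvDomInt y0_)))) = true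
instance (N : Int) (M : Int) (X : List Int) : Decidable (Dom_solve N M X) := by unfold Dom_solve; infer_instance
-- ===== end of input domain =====

-- B replaces A's gap-index bookkeeping and per-segment summation by "total range minus the
-- N-1 largest gap values" (objective: simpler). Both A and B sort X in place; the theorems
-- here are about the return value (the mutation is identical in both).

-- ===== PORT A =====
def solve (N : Int) (M : Int) (X : List Int) : Int :=
  if N ≥ M then 0
  else
    let Xs := PySem.List.sorted X (fun x => x)
    let d := (PySem.List.pyRange 0 (M - 1) 1).map
      (fun i => (i, PySem.List.pyGetD Xs (i + 1) 0 - PySem.List.pyGetD Xs i 0))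
    let ds := PySem.List.sorted d (fun p => p.2) true
    let d2 := PySem.List.slice ds none (some (N - 1))
    let d2s := PySem.List.sorted d2 (fun p => p.1)
    let split_pos := [(-1 : Int)] ++ d2s.map (fun p => p.1) ++ [M - 1]
    (PySem.List.pyRange 0 ((split_pos.length : Int) - 1) 1).foldl
      (fun ans i =>
        ans + (PySem.List.pyGetD Xs (PySem.List.pyGetD split_pos (i + 1) 0) 0
               - PySem.List.pyGetD Xs (PySem.List.pyGetD split_pos i 0 + 1) 0)) 0

-- ===== PORT B =====
def solve_alt (N : Int) (M : Int) (X : List Int) : Int :=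
  if N ≥ M then 0
  else
    let Xs := PySem.List.sorted X (fun x => x)
    let gaps := (PySem.List.pyRange 0 (M - 1) 1).map
      (fun i => PySem.List.pyGetD Xs (i + 1) 0 - PySem.List.pyGetD Xs i 0)
    let gs := PySem.List.sorted gaps (fun x => x) true
    PySem.List.pyGetD Xs (M - 1) 0 - PySem.List.pyGetD Xs 0 0
      - (PySem.List.slice gs none (some (N - 1))).sum

-- ===== PRECONDITION & SPEC =====
-- Pre_solve is exactly the set of inputs on which the Python A returns (elsewhere A raises
-- IndexError on an out-of-range X access): either the N >= M guard fires, or X is long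
-- enough for every index A reads (M ≤ len X when M ≥ 1; 1 - M ≤ len X when M ≤ 0, where
-- X[M-1] is a negative Python index).
def Pre_solve (N : Int) (M : Int) (X : List Int) : Prop :=
  N ≥ M ∨ (1 ≤ M ∧ M ≤ (X.length : Int)) ∨ (M ≤ 0 ∧ 1 - M ≤ (X.length : Int))
instance (N : Int) (M : Int) (X : List Int) : Decidable (Pre_solve N M X) := by
  unfold Pre_solve; infer_instance
def pvWitness_solve : Int × Int × List Int := (2, 4, [1, 5, 6, 20])

def Spec_solve (N : Int) (M : Int) (X : List Int) (out : Int) : Prop := out = solve_alt N M X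
instance (N : Int) (M : Int) (X : List Int) (out : Int) : Decidable (Spec_solve N M X out) := by
  unfold Spec_solve; infer_instance

-- ===== CLAIM (what is proved, stated in full; the proofs are below) =====
def Claim_equal_solve : Prop := ∀ (N : Int) (M : Int) (X : List Int), Dom_solve N M X → Pre_solve N M X → Spec_solve N M X (solve N M X)

-- ===== LEMMAS AND PROOFS =====

-- The indexing loop over range(len(sp)-1) reading sp[i], sp[i+1] is the sum over adjacent pairs.
theorem pv_fold_adjacent (f : Int → Int → Int) (sp : List Int) (c : Int) :
    (PySem.List.pyRange 0 ((sp.length : Int) - 1) 1).foldl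
      (fun a i => a + f (PySem.List.pyGetD sp i 0) (PySem.List.pyGetD sp (i + 1) 0)) c
    = c + ((sp.zip sp.tail).map (fun p => f p.1 p.2)).sum := by
  rw [PySem.List.foldl_add]
  congr 1
  apply congrArg
  apply List.ext_getElem
  · simp [PySem.List.length_pyRange_one]
  · intro j hj _
    rw [List.getElem_map, List.getElem_map, PySem.List.getElem_pyRange_one]
    rw [List.length_map, PySem.List.length_pyRange_one] at hj
    have h1 : j < sp.length := by omega
    have h2 : j + 1 < sp.length := by omega
    rw [List.getElem_zip]
    have e1 : PySem.List.pyGetD sp (0 + (j : Int)) 0 = sp[j] := by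
      rw [show (0 : Int) + (j : Int) = ((j : Nat) : Int) by ring,
        PySem.List.pyGetD_natCast]
      exact List.getD_eq_getElem sp 0 h1
    have e2 : PySem.List.pyGetD sp (0 + (j : Int) + 1) 0 = sp[j + 1] := by
      rw [show (0 : Int) + (j : Int) + 1 = ((j + 1 : Nat) : Int) by push_cast; ring,
        PySem.List.pyGetD_natCast]
      exact List.getD_eq_getElem sp 0 h2
    rw [e1, e2]
    congr 1
    rw [List.getElem_tail]

-- Telescoping: summing g s' - h s over adjacent pairs of prev :: mid ++ [last].
theorem pv_telescope (g h : Int → Int) (mid : List Int) (prev last : Int) :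
    (((prev :: (mid ++ [last])).zip (mid ++ [last])).map (fun p => g p.2 - h p.1)).sum
    = g last - h prev + (mid.map (fun s => g s - h s)).sum := by
  induction mid generalizing prev with
  | nil =>
    simp only [List.nil_append, List.zip_cons_cons, List.zip_nil_right, List.map_cons,
      List.map_nil, List.sum_cons, List.sum_nil]
  | cons s mid ih =>
    simp only [List.cons_append, List.zip_cons_cons, List.map_cons, List.sum_cons]
    rw [ih s]
    ring

-- map commutes with insertBy when the comparator factors through the map.
theorem pv_map_insertBy {α β : Type} (f : α → β) (b : α → α → Bool) (b' : β → β → Bool)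
    (hb : ∀ a c, b a c = b' (f a) (f c)) (x : α) (ys : List α) :
    (PySem.List.insertBy b x ys).map f = PySem.List.insertBy b' (f x) (ys.map f) := by
  induction ys with
  | nil => simp [PySem.List.insertBy]
  | cons y ys ih =>
    simp only [PySem.List.insertBy, List.map_cons]
    rw [hb]
    by_cases h : b' (f x) (f y) = true
    · simp [h]
    · simp [h, ih]

theorem pv_map_foldl_insertBy {α β : Type} (f : α → β) (b : α → α → Bool) (b' : β → β → Bool)
    (hb : ∀ a c, b a c = b' (f a) (f c)) (l : List α) (acc : List α) :
    (l.foldl (fun acc x => PySem.List.insertBy b x acc) acc).map f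
    = (l.map f).foldl (fun acc y => PySem.List.insertBy b' y acc) (acc.map f) := by
  induction l generalizing acc with
  | nil => simp
  | cons x l ih =>
    simp only [List.foldl_cons, List.map_cons]
    rw [ih, pv_map_insertBy f b b' hb]

-- sorted(pairs, key=snd, reverse=True) projected to snd is sorted(values, reverse=True).
theorem pv_map_snd_sorted_rev (l : List (Int × Int)) :
    (PySem.List.sorted l (fun p => p.2) true).map (fun p => p.2)
    = PySem.List.sorted (l.map (fun p => p.2)) (fun x => x) true := by
  rw [PySem.List.sorted_rev_eq_foldl_insertBy, PySem.List.sorted_rev_eq_foldl_insertBy]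
  have := pv_map_foldl_insertBy (fun p : Int × Int => p.2)
    (fun a b => decide (b.2 < a.2)) (fun a b => decide (b < a)) (fun a c => rfl) l []
  simpa using this

-- map commutes with the prefix slice xs[:b].
theorem pv_map_slice {α β : Type} (f : α → β) (l : List α) (b : Int) :
    (PySem.List.slice l none (some b)).map f = PySem.List.slice (l.map f) none (some b) := by
  by_cases hb : 0 ≤ b
  · rw [PySem.List.slice_to l hb, PySem.List.slice_to (l.map f) hb, List.map_take]
  · have hk : 0 < (-b).toNat := by omega
    have hb' : b = -(((-b).toNat : Nat) : Int) := by omega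
    rw [hb', PySem.List.slice_to_neg_natCast l _ hk, PySem.List.slice_to_neg_natCast (l.map f) _ hk,
      List.map_take, List.length_map]

-- The full equivalence, with no precondition (the totalised ports agree everywhere).
theorem pv_solve_eq_alt (N : Int) (M : Int) (X : List Int) : solve N M X = solve_alt N M X := by
  unfold solve solve_alt
  by_cases hNM : N ≥ M
  · simp [hNM]
  · simp only [hNM, if_false]
    set Xs := PySem.List.sorted X (fun x => x) with hXs
    set gap : Int → Int := fun i => PySem.List.pyGetD Xs (i + 1) 0 - PySem.List.pyGetD Xs i 0 with hgap
    set d := (PySem.List.pyRange 0 (M - 1) 1).map (fun i => (i, gap i)) with hd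
    set ds := PySem.List.sorted d (fun p => p.2) true with hds
    set d2 := PySem.List.slice ds none (some (N - 1)) with hd2
    set d2s := PySem.List.sorted d2 (fun p => p.1) with hd2s
    -- the A-side loop
    rw [pv_fold_adjacent (fun p q => PySem.List.pyGetD Xs q 0 - PySem.List.pyGetD Xs (p + 1) 0)]
    have hsp : ([(-1 : Int)] ++ d2s.map (fun p => p.1) ++ [M - 1])
        = (-1) :: (d2s.map (fun p => p.1) ++ [M - 1]) := by simp
    rw [hsp]
    simp only [List.tail_cons]
    rw [pv_telescope (fun q => PySem.List.pyGetD Xs q 0) (fun p => PySem.List.pyGetD Xs (p + 1) 0)]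
    -- every pair of d2s satisfies snd = gap fst
    have hmem : ∀ p ∈ d2s, p.2 = gap p.1 := by
      intro p hp
      rw [hd2s, PySem.List.mem_sorted] at hp
      have hp2 : p ∈ ds := PySem.List.mem_of_mem_slice ds none (some (N - 1)) hp
      rw [hds, PySem.List.mem_sorted, hd] at hp2
      obtain ⟨i, _, hi⟩ := List.mem_map.mp hp2
      rw [← hi]
    have hcongr : (d2s.map (fun p => p.1)).map
        (fun s => PySem.List.pyGetD Xs s 0 - PySem.List.pyGetD Xs (s + 1) 0)
        = d2s.map (fun p => -p.2) := by
      rw [List.map_map]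
      apply List.map_congr_left
      intro p hp
      simp only [Function.comp]
      rw [hmem p hp, hgap]
      ring
    rw [hcongr]
    -- sum of negated snds; sort by fst is a permutation
    have hperm : (d2s.map (fun p => -p.2)).Perm (d2.map (fun p => -p.2)) :=
      (PySem.List.sorted_perm d2 (fun p => p.1) false).map _
    rw [hperm.sum_eq]
    have hneg : (d2.map (fun p => -p.2)).sum = -((d2.map (fun p => p.2)).sum) := by
      rw [show (fun p : Int × Int => -p.2) = (fun x => -x) ∘ (fun p : Int × Int => p.2) by rfl,
        ← List.map_map]
      exact (List.sum_neg (d2.map (fun p => p.2))).symm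
    rw [hneg]
    -- B's selected gaps are A's selected pairs' snds
    have hsel : (d2.map (fun p => p.2)).sum
        = (PySem.List.slice (PySem.List.sorted ((PySem.List.pyRange 0 (M - 1) 1).map gap)
            (fun x => x) true) none (some (N - 1))).sum := by
      rw [hd2, pv_map_slice, hds, pv_map_snd_sorted_rev, hd, List.map_map]
      simp [Function.comp_def]
    rw [hsel]
    have h0 : PySem.List.pyGetD Xs ((-1 : Int) + 1) 0 = PySem.List.pyGetD Xs 0 0 := by norm_num
    rw [h0]
    ring

-- ===== VERDICT (by name: the statement is the Claim_ definition above) =====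
theorem solve_spec : Claim_equal_solve := by
  intro N M X _ _
  unfold Spec_solve
  exact pv_solve_eq_alt N M X
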